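-- pv_equiv track=rewrite | github.com/NiranjanV823/INTERN_FILES_HSL_2024 | CODES/momentum_twelve.py | adjust_year_end
-- ===== SOURCE A (Python) =====
-- def adjust_year_end(year,month,offset):
--
--     new_month = month + offset
--     new_year = year
--
--     while new_month < 1:
--         new_month +=12
--         new_year -=1
--
--     while new_month > 12:
--         new_month -=12
--         new_year +=1
--
--     return new_year*100 + new_month
-- ===== SOURCE B (Python) =====
-- def adjust_year_end(year, month, offset):
--     total = month + offset - 1
--     return (year + total // 12) * 100 + total % 12 + 1
-- ===== Notes on version B (the rewrite author's own statement) =====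
-- stated objective: faster
-- what changed: Replaced the two normalization while-loops with a closed-form floor-division/modulo computation on month+offset-1.
import Mathlib
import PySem

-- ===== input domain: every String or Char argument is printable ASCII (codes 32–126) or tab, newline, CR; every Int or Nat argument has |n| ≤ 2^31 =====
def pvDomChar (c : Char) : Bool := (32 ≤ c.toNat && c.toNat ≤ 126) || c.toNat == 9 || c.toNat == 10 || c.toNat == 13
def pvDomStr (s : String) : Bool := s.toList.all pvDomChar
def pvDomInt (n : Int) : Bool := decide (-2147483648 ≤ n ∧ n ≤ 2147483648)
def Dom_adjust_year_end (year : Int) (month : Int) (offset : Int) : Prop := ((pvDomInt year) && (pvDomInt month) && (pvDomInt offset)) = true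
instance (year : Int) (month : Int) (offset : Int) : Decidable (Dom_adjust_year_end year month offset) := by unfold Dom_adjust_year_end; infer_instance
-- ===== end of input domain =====

-- B replaces A's two normalization while-loops with a closed-form floor-division formula (O(1) instead of O(|offset|)).


-- ===== PORT A =====
-- first while-loop: while new_month < 1: new_month += 12; new_year -= 1
def pvLoopUp (new_year new_month : Int) : Int × Int :=
  if new_month < 1 then pvLoopUp (new_year - 1) (new_month + 12) else (new_year, new_month)
termination_by (1 - new_month).toNat
decreasing_by omega

-- second while-loop: while new_month > 12: new_month -= 12; new_year += 1
def pvLoopDown (new_year new_month : Int) : Int × Int :=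
  if new_month > 12 then pvLoopDown (new_year + 1) (new_month - 12) else (new_year, new_month)
termination_by (new_month - 12).toNat
decreasing_by omega

def adjust_year_end (year : Int) (month : Int) (offset : Int) : Int :=
  let p := pvLoopUp year (month + offset)
  let q := pvLoopDown p.1 p.2
  q.1 * 100 + q.2

-- ===== PORT B =====
def adjust_year_end_alt (year : Int) (month : Int) (offset : Int) : Int :=
  let total := month + offset - 1
  (year + PySem.Int.floordiv total 12) * 100 + PySem.Int.mod total 12 + 1

-- ===== PRECONDITION & SPEC =====
def Spec_adjust_year_end (year : Int) (month : Int) (offset : Int) (out : Int) : Prop := out = adjust_year_end_alt year month offset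
instance (year : Int) (month : Int) (offset : Int) (out : Int) : Decidable (Spec_adjust_year_end year month offset out) := by unfold Spec_adjust_year_end; infer_instance

-- ===== CLAIM (what is proved, stated in full; the proofs are below) =====
def Claim_equal_adjust_year_end : Prop := ∀ (year : Int) (month : Int) (offset : Int), Dom_adjust_year_end year month offset → Spec_adjust_year_end year month offset (adjust_year_end year month offset)

-- ===== LEMMAS AND PROOFS =====

-- the first loop is the identity once new_month ≥ 1
theorem pvLoopUp_ge (y m : Int) (h : 1 ≤ m) : pvLoopUp y m = (y, m) := by
  rw [pvLoopUp]; simp [show ¬ m < 1 by omega]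

-- for new_month < 1 the first loop lands exactly on the floor-division normal form
theorem pvLoopUp_lt : ∀ (n : Nat) (y m : Int), (1 - m).toNat = n → m < 1 →
    pvLoopUp y m = (y + (m - 1) / 12, (m - 1) % 12 + 1) := by
  intro n
  induction n using Nat.strong_induction_on with
  | _ n ih =>
    intro y m hn hm
    rw [pvLoopUp]
    simp only [hm, if_pos]
    by_cases h2 : m + 12 < 1
    · rw [ih ((1 - (m + 12)).toNat) (by omega) (y - 1) (m + 12) rfl h2]
      simp only [Prod.mk.injEq]; constructor <;> omega
    · rw [pvLoopUp_ge _ _ (by omega)]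
      simp only [Prod.mk.injEq]; constructor <;> omega

-- the second loop is the identity once new_month ≤ 12
theorem pvLoopDown_le (y m : Int) (h : m ≤ 12) : pvLoopDown y m = (y, m) := by
  rw [pvLoopDown]; simp [show ¬ m > 12 by omega]

-- for 1 ≤ new_month the second loop lands exactly on the floor-division normal form
theorem pvLoopDown_eq : ∀ (n : Nat) (y m : Int), (m - 12).toNat = n → 1 ≤ m →
    pvLoopDown y m = (y + (m - 1) / 12, (m - 1) % 12 + 1) := by
  intro n
  induction n using Nat.strong_induction_on with
  | _ n ih =>
    intro y m hn hm
    rw [pvLoopDown]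
    by_cases h2 : m > 12
    · simp only [h2, if_pos]
      rw [ih ((m - 12 - 12).toNat) (by omega) (y + 1) (m - 12) rfl (by omega)]
      simp only [Prod.mk.injEq]; constructor <;> omega
    · simp only [h2, if_neg, not_false_iff]
      simp only [Prod.mk.injEq]; constructor <;> omega

-- ===== VERDICT (by name: the statement is the Claim_ definition above) =====
theorem adjust_year_end_spec : Claim_equal_adjust_year_end := by
  intro year month offset _
  unfold Spec_adjust_year_end adjust_year_end adjust_year_end_alt
  dsimp only
  rw [PySem.Int.floordiv_eq_ediv_of_pos (by norm_num : (0:Int) < 12), PySem.Int.mod_eq_emod_of_pos (by norm_num : (0:Int) < 12)]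
  by_cases h : month + offset < 1
  · rw [pvLoopUp_lt ((1 - (month + offset)).toNat) year (month + offset) rfl h]
    rw [pvLoopDown_le _ _ (by omega)]
    ring_nf
  · rw [pvLoopUp_ge _ _ (by omega)]
    rw [pvLoopDown_eq ((month + offset - 12).toNat) year (month + offset) rfl (by omega)]
    ring_nf
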